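-- pv_equiv track=rewrite | github.com/mitsutaka-wataya/tool | make_dataframe.py | make_stim_index
-- ===== SOURCE A (Python) =====
-- def make_stim_index(df_index_num,stim_point):
--     stim_index = []
--     for i in range(df_index_num):
--         if i <stim_point:
--             stim_index += [False]
--         elif i >= stim_point:
--             stim_index += [True]
--     return(stim_index)
-- ===== SOURCE B (Python) =====
-- def make_stim_index(df_index_num, stim_point):
--     n = max(df_index_num, 0)
--     f = min(max(stim_point, 0), n)
--     return [False] * f + [True] * (n - f)
-- ===== Notes on version B (the rewrite author's own statement) =====
-- stated objective: faster
-- what changed: Replaces the per-element loop with a single clamped boundary computation f = clamp(stim_point, 0, n) and builds the answer as two homogeneous runs [False]*f + [True]*(n-f).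
import Mathlib
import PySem

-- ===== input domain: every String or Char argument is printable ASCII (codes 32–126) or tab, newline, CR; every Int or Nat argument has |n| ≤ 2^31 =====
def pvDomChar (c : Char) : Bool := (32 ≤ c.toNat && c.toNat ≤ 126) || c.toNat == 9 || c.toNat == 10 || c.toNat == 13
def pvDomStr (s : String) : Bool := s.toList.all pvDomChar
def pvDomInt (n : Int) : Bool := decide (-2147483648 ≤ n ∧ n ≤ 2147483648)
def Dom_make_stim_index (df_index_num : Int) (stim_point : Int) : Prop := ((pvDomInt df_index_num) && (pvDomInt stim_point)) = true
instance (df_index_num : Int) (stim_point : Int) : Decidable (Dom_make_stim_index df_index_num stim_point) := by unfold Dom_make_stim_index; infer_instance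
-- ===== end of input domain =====

-- B replaces the per-element scan by one clamped boundary f and two homogeneous runs (simpler).

-- ===== PORT A =====
def make_stim_index (df_index_num : Int) (stim_point : Int) : List Bool :=
  (PySem.List.pyRange 0 df_index_num 1).foldl
    (fun stim_index i =>
      if i < stim_point then stim_index ++ [false]
      else if stim_point ≤ i then stim_index ++ [true]
      else stim_index) []

-- ===== PORT B =====
def make_stim_index_alt (df_index_num : Int) (stim_point : Int) : List Bool :=
  let n := max df_index_num 0
  let f := min (max stim_point 0) n
  List.replicate f.toNat false ++ List.replicate (n - f).toNat true

-- ===== PRECONDITION & SPEC =====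
def Spec_make_stim_index (df_index_num : Int) (stim_point : Int) (out : List Bool) : Prop := out = make_stim_index_alt df_index_num stim_point
instance (df_index_num : Int) (stim_point : Int) (out : List Bool) : Decidable (Spec_make_stim_index df_index_num stim_point out) := by unfold Spec_make_stim_index; infer_instance

-- ===== CLAIM (what is proved, stated in full; the proofs are below) =====
def Claim_equal_make_stim_index : Prop := ∀ (df_index_num : Int) (stim_point : Int), Dom_make_stim_index df_index_num stim_point → Spec_make_stim_index df_index_num stim_point (make_stim_index df_index_num stim_point)

-- ===== LEMMAS AND PROOFS =====

-- The loop over range m produces the two clamped runs.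
lemma msi_range_loop (sp : Int) (m : Nat) :
    (List.range m).foldl
      (fun acc (k : Nat) =>
        if (k : Int) < sp then acc ++ [false]
        else if sp ≤ (k : Int) then acc ++ [true]
        else acc) []
    = List.replicate (min (max sp 0) (m : Int)).toNat false
      ++ List.replicate ((m : Int) - min (max sp 0) (m : Int)).toNat true := by
  induction m with
  | zero => simp
  | succ m ih =>
    rw [List.range_succ, List.foldl_append, ih]
    by_cases h : (m : Int) < sp
    · have h1 : min (max sp 0) ((m : Int) + 1) = min (max sp 0) (m : Int) + 1 ∨
          min (max sp 0) ((m : Int) + 1) = min (max sp 0) (m : Int) := by omega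
      simp only [List.foldl_cons, List.foldl_nil, if_pos h]
      have hf : (min (max sp 0) ((m : Int) + 1)).toNat
          = (min (max sp 0) (m : Int)).toNat + 1 := by omega
      have ht : ((m : Int) + 1 - min (max sp 0) ((m : Int) + 1)).toNat
          = ((m : Int) - min (max sp 0) (m : Int)).toNat := by omega
      have hz : ((m : Int) - min (max sp 0) (m : Int)).toNat = 0 := by omega
      push_cast
      rw [hf, ht, hz, List.replicate_succ' ]
      simp
    · have hle : sp ≤ (m : Int) := by omega
      simp only [List.foldl_cons, List.foldl_nil, if_neg h, if_pos hle]
      have hf : (min (max sp 0) ((m : Int) + 1)).toNat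
          = (min (max sp 0) (m : Int)).toNat := by omega
      have ht : ((m : Int) + 1 - min (max sp 0) ((m : Int) + 1)).toNat
          = ((m : Int) - min (max sp 0) (m : Int)).toNat + 1 := by omega
      push_cast
      rw [hf, ht, List.replicate_succ', List.append_assoc]

-- ===== VERDICT (by name: the statement is the Claim_ definition above) =====
theorem make_stim_index_spec : Claim_equal_make_stim_index := by
  intro n sp _
  unfold Spec_make_stim_index make_stim_index make_stim_index_alt
  rw [PySem.List.pyRange_one]
  simp only [Int.sub_zero, List.foldl_map, Int.zero_add]
  rw [msi_range_loop sp n.toNat]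
  have : ((n.toNat : Int)) = max n 0 := by omega
  rw [this]
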